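-- pv_equiv track=rewrite | github.com/khelwood/advent-of-code | 2021/d19_faster.py | calculate_differences
-- ===== SOURCE A (Python) =====
-- from itertools import combinations
-- from collections import defaultdict
--
-- def subp(a,b):
--     return (a[0]-b[0], a[1]-b[1], a[2]-b[2])
--
-- def negp(a):
--     return (-a[0], -a[1], -a[2])
--
-- def calculate_differences(beacons, symmetric=False):
--     diffs = defaultdict(set)
--     for a,b in combinations(beacons, 2):
--         d = subp(b,a)
--         if symmetric:
--             d = tuple(sorted(map(abs, d)))
--             diffs[a].add(d)
--             diffs[b].add(d)
--         else:
--             diffs[a].add(d)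
--             diffs[b].add(negp(d))
--     diffs.default_factory = None
--     return diffs
-- ===== SOURCE B (Python) =====
-- def calculate_differences(beacons, symmetric=False):
--     # Recursive decomposition: head beacon's row + back-edges, then merge the
--     # recursively computed table of the tail.
--     if len(beacons) < 2:
--         return {}
--     x, rest = beacons[0], beacons[1:]
--     if symmetric:
--         def diff(b):
--             return tuple(sorted((abs(b[0] - x[0]), abs(b[1] - x[1]), abs(b[2] - x[2]))))
--         back = diff
--     else:
--         def diff(b):
--             return (b[0] - x[0], b[1] - x[1], b[2] - x[2])
--         def back(b):
--             return (x[0] - b[0], x[1] - b[1], x[2] - b[2])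
--     out = {x: {diff(b) for b in rest}}
--     for b in rest:
--         out.setdefault(b, set()).add(back(b))
--     for k, s in calculate_differences(rest, symmetric).items():
--         out.setdefault(k, set()).update(s)
--     return out
-- ===== Notes on version B (the rewrite author's own statement) =====
-- stated objective: alternative
-- what changed: A iterates itertools.combinations(beacons,2) over a defaultdict, doing two symmetric/negated insertions per pair; B is recursive on the list: it builds the head beacon's full row as one set comprehension, adds the single back-edge to each tail beacon in a second pass, then merges the recursively computed table of the tail into the result.
import Mathlib
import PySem

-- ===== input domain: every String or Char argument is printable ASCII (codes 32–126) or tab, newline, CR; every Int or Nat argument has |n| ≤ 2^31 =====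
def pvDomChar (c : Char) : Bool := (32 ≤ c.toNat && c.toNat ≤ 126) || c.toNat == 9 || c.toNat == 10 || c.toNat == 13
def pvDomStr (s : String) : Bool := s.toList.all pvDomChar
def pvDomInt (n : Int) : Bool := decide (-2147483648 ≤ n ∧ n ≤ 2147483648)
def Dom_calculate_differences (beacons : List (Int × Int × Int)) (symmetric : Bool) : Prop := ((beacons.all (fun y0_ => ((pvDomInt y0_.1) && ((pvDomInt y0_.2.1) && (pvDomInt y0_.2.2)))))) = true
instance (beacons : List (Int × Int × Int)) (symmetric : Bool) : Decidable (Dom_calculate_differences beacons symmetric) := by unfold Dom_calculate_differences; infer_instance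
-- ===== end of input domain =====

-- B replaces A's combinations(beacons,2) loop (two defaultdict insertions per pair) by a
-- recursion on the list: head beacon's row as one set comprehension, a back-edge pass over
-- the tail, then a merge of the recursively computed table of the tail; same O(n^2) cost.

-- ===== PORT A =====
-- helper subp(a,b)
def subp (a b : Int × Int × Int) : Int × Int × Int :=
  (a.1 - b.1, a.2.1 - b.2.1, a.2.2 - b.2.2)

-- helper negp(a)
def negp (a : Int × Int × Int) : Int × Int × Int :=
  (-a.1, -a.2.1, -a.2.2)

-- tuple(sorted(map(abs, d))) for a 3-tuple (the '_ => (0,0,0)' arm is unreachable: sorted keeps length 3)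
def tupleSortedAbs (d : Int × Int × Int) : Int × Int × Int :=
  match PySem.List.sorted [|d.1|, |d.2.1|, |d.2.2|] (fun x => x) false with
  | [x, y, z] => (x, y, z)
  | _ => (0, 0, 0)

def calculate_differences (beacons : List (Int × Int × Int)) (symmetric : Bool) : List (Int × Int × Int × List (Int × Int × Int)) :=
  -- diffs = defaultdict(set); for a,b in combinations(beacons,2): ...
  let diffs : PySem.Dict (Int × Int × Int) (PySem.Set (Int × Int × Int)) :=
    (PySem.List.combinations beacons 2).foldl
      (fun diffs c =>
        match c with
        | [a, b] =>
          let d := subp b a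
          if symmetric then
            let d' := tupleSortedAbs d
            ((diffs.modify a PySem.Set.empty (fun s => PySem.Set.add s d')).modify b
              PySem.Set.empty (fun s => PySem.Set.add s d'))
          else
            ((diffs.modify a PySem.Set.empty (fun s => PySem.Set.add s d)).modify b
              PySem.Set.empty (fun s => PySem.Set.add s (negp d)))
        | _ => diffs)
      PySem.Dict.empty
  diffs.items.map (fun p => (p.1.1, p.1.2.1, p.1.2.2, p.2))

-- ===== PORT B =====
-- the nested helpers diff / back of Source B (closures over the head x and the symmetric flag)
def difff (symmetric : Bool) (x b : Int × Int × Int) : Int × Int × Int :=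
  if symmetric then tupleSortedAbs (b.1 - x.1, b.2.1 - x.2.1, b.2.2 - x.2.2)
  else (b.1 - x.1, b.2.1 - x.2.1, b.2.2 - x.2.2)

def backf (symmetric : Bool) (x b : Int × Int × Int) : Int × Int × Int :=
  if symmetric then difff symmetric x b else (x.1 - b.1, x.2.1 - b.2.1, x.2.2 - b.2.2)

def calculate_differences_alt (beacons : List (Int × Int × Int)) (symmetric : Bool) : List (Int × Int × Int × List (Int × Int × Int)) :=
  match beacons with
  | [] => []
  | x :: rest =>
    if rest = [] then []  -- len(beacons) < 2
    else
      -- out = {x: {diff(b) for b in rest}}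
      let out0 : PySem.Dict (Int × Int × Int) (PySem.Set (Int × Int × Int)) :=
        PySem.Dict.empty.insert x (PySem.Set.ofList (rest.map (difff symmetric x)))
      -- for b in rest: out.setdefault(b, set()).add(back(b))
      let out1 := rest.foldl
        (fun o b => o.modify b PySem.Set.empty (fun s => PySem.Set.add s (backf symmetric x b))) out0
      -- for k, s in calculate_differences(rest, symmetric).items(): out.setdefault(k, set()).update(s)
      let out2 := (calculate_differences_alt rest symmetric).foldl
        (fun o kv => o.modify (kv.1, kv.2.1, kv.2.2.1) PySem.Set.empty
          (fun s => PySem.Set.update s kv.2.2.2)) out1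
      out2.items.map (fun p => (p.1.1, p.1.2.1, p.1.2.2, p.2))

-- ===== PRECONDITION & SPEC =====
def Spec_calculate_differences (beacons : List (Int × Int × Int)) (symmetric : Bool) (out : List (Int × Int × Int × List (Int × Int × Int))) : Prop := out = calculate_differences_alt beacons symmetric
instance (beacons : List (Int × Int × Int)) (symmetric : Bool) (out : List (Int × Int × Int × List (Int × Int × Int))) : Decidable (Spec_calculate_differences beacons symmetric out) := by
  unfold Spec_calculate_differences
  exact @instDecidableEqList _ instDecidableEqProd out (calculate_differences_alt beacons symmetric)

-- ===== CLAIM (what is proved, stated in full; the proofs are below) =====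
def Claim_equal_calculate_differences : Prop := ∀ (beacons : List (Int × Int × Int)) (symmetric : Bool), Dom_calculate_differences beacons symmetric → Spec_calculate_differences beacons symmetric (calculate_differences beacons symmetric)

-- ===== LEMMAS AND PROOFS =====

-- Both programs insert, for a key a and a partner b, the same value `gfun sym a b`:
abbrev Pt := Int × Int × Int

def gfun (sym : Bool) (a b : Pt) : Pt :=
  if sym then tupleSortedAbs (subp b a) else subp b a

-- one dictionary update 'diffs[k].add(v)'
def applyOp (d : PySem.Dict Pt (PySem.Set Pt)) (p : Pt × Pt) : PySem.Dict Pt (PySem.Set Pt) :=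
  d.modify p.1 PySem.Set.empty (fun s => PySem.Set.add s p.2)

-- one dictionary update 'diffs.setdefault(k, set()).update(vs)'
def applyUpd (d : PySem.Dict Pt (PySem.Set Pt)) (p : Pt × List Pt) : PySem.Dict Pt (PySem.Set Pt) :=
  d.modify p.1 PySem.Set.empty (fun s => PySem.Set.update s p.2)

-- the values inserted at key k by a sequence of updates
def valsFor (k : Pt) (ops : List (Pt × Pt)) : List Pt :=
  (ops.filter (fun p => p.1 == k)).map (fun p => p.2)

-- the values merged into key k by a sequence of set-updates
def valsU (k : Pt) (ops : List (Pt × List Pt)) : List Pt :=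
  ops.flatMap (fun p => if p.1 = k then p.2 else [])

-- A's update sequence, structurally
def opsAL (sym : Bool) : List Pt → List (Pt × Pt)
  | [] => []
  | x :: xs => (xs.flatMap (fun y => [(x, gfun sym x y), (y, gfun sym y x)])) ++ opsAL sym xs

-- B's update sequence, structurally: head row, back edges, recursive ops of the tail
def opsBL (sym : Bool) : List Pt → List (Pt × Pt)
  | [] => []
  | x :: xs => (xs.map (fun y => (x, gfun sym x y))) ++
      ((xs.map (fun y => (y, gfun sym y x))) ++ opsBL sym xs)

theorem negp_subp (a b : Pt) : negp (subp b a) = subp a b := by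
  simp [negp, subp]

theorem tsa_comm (a b : Pt) : tupleSortedAbs (subp b a) = tupleSortedAbs (subp a b) := by
  unfold tupleSortedAbs subp
  have h1 : |b.1 - a.1| = |a.1 - b.1| := abs_sub_comm _ _
  have h2 : |b.2.1 - a.2.1| = |a.2.1 - b.2.1| := abs_sub_comm _ _
  have h3 : |b.2.2 - a.2.2| = |a.2.2 - b.2.2| := abs_sub_comm _ _
  simp only
  rw [h1, h2, h3]

-- a fold whose every step is itself a fold of elementary updates
theorem foldl_ops {α β γ : Type} (s : γ → α → γ) (opsOf : α → List β) (ap : γ → β → γ)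
    (h : ∀ d x, s d x = (opsOf x).foldl ap d) :
    ∀ (xs : List α) (d : γ), xs.foldl s d = (xs.flatMap opsOf).foldl ap d := by
  intro xs
  induction xs with
  | nil => intro d; rfl
  | cons x xs ih => intro d; simp only [List.foldl_cons, List.flatMap_cons, List.foldl_append, h, ih]

-- A's pair ops, per combination
def pairOps (sym : Bool) (c : List Pt) : List (Pt × Pt) :=
  match c with
  | [a, b] => [(a, gfun sym a b), (b, gfun sym b a)]
  | _ => []

theorem combos_ops (sym : Bool) :
    ∀ l : List Pt, (PySem.List.combinations l 2).flatMap (pairOps sym) = opsAL sym l := by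
  intro l
  induction l with
  | nil => simp [PySem.List.combinations_nil_succ 1, opsAL]
  | cons x xs ih =>
    rw [show (2 : Nat) = 1 + 1 from rfl, PySem.List.combinations_cons_succ,
      PySem.List.combinations_one]
    rw [List.flatMap_append, List.map_map, List.flatMap_map]
    show (xs.flatMap fun y => pairOps sym [x, y]) ++ _ = _
    rw [ih]
    rfl

theorem portA_eq (beacons : List Pt) (sym : Bool) :
    calculate_differences beacons sym =
      ((opsAL sym beacons).foldl applyOp PySem.Dict.empty).items.map
        (fun p => (p.1.1, p.1.2.1, p.1.2.2, p.2)) := by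
  unfold calculate_differences
  have hstep : ∀ (d : PySem.Dict Pt (PySem.Set Pt)) (c : List Pt),
      (fun (diffs : PySem.Dict Pt (PySem.Set Pt)) (c : List Pt) =>
        match c with
        | [a, b] =>
          let d := subp b a
          if sym then
            let d' := tupleSortedAbs d
            ((diffs.modify a PySem.Set.empty (fun s => PySem.Set.add s d')).modify b
              PySem.Set.empty (fun s => PySem.Set.add s d'))
          else
            ((diffs.modify a PySem.Set.empty (fun s => PySem.Set.add s d)).modify b
              PySem.Set.empty (fun s => PySem.Set.add s (negp d)))
        | _ => diffs) d c = (pairOps sym c).foldl applyOp d := by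
    intro d c
    match c with
    | [] => rfl
    | [a] => rfl
    | a :: b :: z :: t => rfl
    | [a, b] =>
      cases sym with
      | true =>
        show _ = applyOp (applyOp d (a, gfun true a b)) (b, gfun true b a)
        simp [applyOp, gfun, tsa_comm a b]
      | false =>
        show _ = applyOp (applyOp d (a, gfun false a b)) (b, gfun false b a)
        simp [applyOp, gfun, negp_subp]
  show ((PySem.List.combinations beacons 2).foldl
      (fun (diffs : PySem.Dict Pt (PySem.Set Pt)) (c : List Pt) =>
        match c with
        | [a, b] =>
          let d := subp b a
          if sym then
            let d' := tupleSortedAbs d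
            ((diffs.modify a PySem.Set.empty fun s => PySem.Set.add s d').modify b
              PySem.Set.empty fun s => PySem.Set.add s d')
          else
            ((diffs.modify a PySem.Set.empty fun s => PySem.Set.add s d).modify b
              PySem.Set.empty fun s => PySem.Set.add s (negp d))
        | _ => diffs)
      PySem.Dict.empty).items.map (fun p => (p.1.1, p.1.2.1, p.1.2.2, p.2)) = _
  rw [foldl_ops _ (pairOps sym) applyOp hstep (PySem.List.combinations beacons 2), combos_ops sym]

-- valsFor, structurally
theorem valsFor_cons (k : Pt) (p : Pt × Pt) (ops : List (Pt × Pt)) :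
    valsFor k (p :: ops) =
      if p.1 = k then p.2 :: valsFor k ops else valsFor k ops := by
  by_cases h : p.1 = k <;> simp [valsFor, h]

theorem valsFor_append (k : Pt) (a b : List (Pt × Pt)) :
    valsFor k (a ++ b) = valsFor k a ++ valsFor k b := by
  simp [valsFor, List.filter_append]

theorem valsFor_flatMap {β : Type} (k : Pt) (f : β → List (Pt × Pt)) :
    ∀ (xs : List β), valsFor k (xs.flatMap f) = xs.flatMap (fun y => valsFor k (f y)) := by
  intro xs
  induction xs with
  | nil => rfl
  | cons y ys ih => rw [List.flatMap_cons, valsFor_append, ih, List.flatMap_cons]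

theorem valsFor_block (k x : Pt) (g : Pt → Pt) (m : List Pt) :
    valsFor k (m.map (fun y => (x, g y))) = if x = k then m.map g else [] := by
  simp only [valsFor, List.filter_map, List.map_map]
  by_cases hx : x = k
  · subst hx
    simp [Function.comp_def]
  · simp [Function.comp_def, hx]

-- characterization of a fold of elementary updates, per key
theorem getD_fold (k : Pt) :
    ∀ (ops : List (Pt × Pt)) (d : PySem.Dict Pt (PySem.Set Pt)),
      (ops.foldl applyOp d).getD k PySem.Set.empty =
        PySem.Set.update (d.getD k PySem.Set.empty) (valsFor k ops) := by
  intro ops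
  induction ops with
  | nil => intro d; simp [valsFor, PySem.Set.update_nil]
  | cons p ops ih =>
    intro d
    rw [List.foldl_cons, ih, valsFor_cons]
    show PySem.Set.update ((d.modify p.1 PySem.Set.empty
      (fun s => PySem.Set.add s p.2)).getD k PySem.Set.empty) (valsFor k ops) = _
    rw [PySem.Dict.getD_modify]
    by_cases hk : k = p.1
    · rw [if_pos hk, if_pos hk.symm, PySem.Set.update_cons]
      rw [hk]
    · rw [if_neg hk, if_neg (fun h => hk h.symm)]

-- characterization of a fold of set-merges, per key
theorem getD_foldU (k : Pt) :
    ∀ (ops : List (Pt × List Pt)) (d : PySem.Dict Pt (PySem.Set Pt)),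
      (ops.foldl applyUpd d).getD k PySem.Set.empty =
        PySem.Set.update (d.getD k PySem.Set.empty) (valsU k ops) := by
  intro ops
  induction ops with
  | nil => intro d; simp [valsU, PySem.Set.update_nil]
  | cons p ops ih =>
    intro d
    rw [List.foldl_cons, ih]
    show PySem.Set.update ((d.modify p.1 PySem.Set.empty
      (fun s => PySem.Set.update s p.2)).getD k PySem.Set.empty) (valsU k ops) = _
    rw [PySem.Dict.getD_modify,
      show valsU k (p :: ops) = (if p.1 = k then p.2 else []) ++ valsU k ops from rfl,
      PySem.Set.update_append]
    by_cases hk : k = p.1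
    · rw [if_pos hk, if_pos hk.symm, hk]
    · rw [if_neg hk, if_neg (fun h => hk h.symm), PySem.Set.update_nil]

theorem keys_fold (ops : List (Pt × Pt)) (d : PySem.Dict Pt (PySem.Set Pt)) :
    (ops.foldl applyOp d).keys = PySem.Set.update d.keys (ops.map (fun p => p.1)) := by
  exact PySem.Dict.keys_foldl_modify_key ops (fun p => p.1) PySem.Set.empty
    (fun _ p => fun s => PySem.Set.add s p.2) d

theorem items_fold (ops : List (Pt × Pt)) :
    (ops.foldl applyOp PySem.Dict.empty).items =
      (PySem.Set.ofList (ops.map (fun p => p.1))).map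
        (fun k => (k, PySem.Set.ofList (valsFor k ops))) := by
  have hkeys : (ops.foldl applyOp PySem.Dict.empty).keys =
      PySem.Set.ofList (ops.map (fun p => p.1)) := by
    rw [keys_fold, PySem.Dict.keys_empty, PySem.Set.update_nil_left]
  have hnd : (ops.foldl applyOp PySem.Dict.empty).keys.Nodup := by
    rw [hkeys]; exact PySem.Set.nodup_ofList _
  rw [PySem.Dict.items_eq_map_keys _ hnd PySem.Set.empty, hkeys]
  apply List.map_congr_left
  intro k _
  rw [getD_fold k ops PySem.Dict.empty, PySem.Dict.getD_empty]
  rw [show (PySem.Set.empty : PySem.Set Pt) = [] from rfl, PySem.Set.update_nil_left]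

-- Set.update facts specific to the shapes of our update sequences
theorem update_absorb {α : Type} [BEq α] [LawfulBEq α] (s : PySem.Set α) (t : List α)
    (h : ∀ y ∈ t, y ∈ s) : PySem.Set.update s t = s := by
  rw [PySem.Set.update_eq_append_filter]
  have hnil : List.filter (fun y => !s.contains y) (PySem.Set.ofList t) = [] := by
    rw [List.filter_eq_nil_iff]
    intro y hy
    have hys : y ∈ s := h y ((PySem.Set.mem_ofList t y).mp hy)
    simpa using hys
  rw [hnil, List.append_nil]

theorem update_ofList_right {α : Type} [BEq α] [LawfulBEq α] (s : PySem.Set α) (t : List α) :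
    PySem.Set.update s (PySem.Set.ofList t) = PySem.Set.update s t := by
  rw [PySem.Set.update_eq_append_filter, PySem.Set.update_eq_append_filter,
    PySem.Set.ofList_ofList]

theorem update_map_const {α β : Type} [BEq α] [LawfulBEq α] (c : α) :
    ∀ (m : List β) (s : PySem.Set α), m ≠ [] →
      PySem.Set.update s (m.map (fun _ => c)) = PySem.Set.add s c := by
  intro m
  induction m with
  | nil => intro s h; exact absurd rfl h
  | cons x xs ih =>
    intro s _
    rw [List.map_cons, PySem.Set.update_cons]
    cases xs with
    | nil => exact PySem.Set.update_nil _
    | cons z zs =>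
      rw [ih _ (by simp)]
      exact PySem.Set.add_of_mem ((PySem.Set.mem_add s c c).mpr (Or.inr rfl))

-- between self-keyed back edges: update for key k collapses to one add
theorem update_selfblock (k : Pt) (h : Pt → Pt) :
    ∀ (m : List Pt) (s : PySem.Set Pt),
      PySem.Set.update s (valsFor k (m.map (fun y => (y, h y)))) =
        if k ∈ m then PySem.Set.add s (h k) else s := by
  intro m
  induction m with
  | nil => intro s; simp [valsFor, PySem.Set.update_nil]
  | cons y ys ih =>
    intro s
    rw [List.map_cons, valsFor_cons]
    by_cases hy : y = k
    · subst hy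
      rw [if_pos rfl, PySem.Set.update_cons, ih]
      by_cases hk : y ∈ ys
      · rw [if_pos hk, if_pos (show y ∈ y :: ys by simp)]
        show (s.add (h y)).add (h y) = s.add (h y)
        exact PySem.Set.add_of_mem ((PySem.Set.mem_add s (h y) (h y)).mpr (Or.inr rfl))
      · rw [if_neg hk, if_pos (show y ∈ y :: ys by simp)]
    · rw [if_neg hy, ih]
      have hiff : (k ∈ y :: ys) ↔ (k ∈ ys) := by
        constructor
        · intro hm
          rcases List.mem_cons.mp hm with hm | hm
          · exact absurd hm.symm hy
          · exact hm
        · exact fun hm => List.mem_cons.mpr (Or.inr hm)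
      exact (if_congr hiff rfl rfl).symm

theorem update_flatMap_pair {α : Type} [BEq α] [LawfulBEq α] (x : α) :
    ∀ (xs : List α) (s : PySem.Set α), xs ≠ [] →
      PySem.Set.update s (xs.flatMap (fun y => [x, y])) =
        PySem.Set.update (PySem.Set.add s x) xs := by
  intro xs
  induction xs with
  | nil => intro s h; exact absurd rfl h
  | cons y ys ih =>
    intro s _
    rw [List.flatMap_cons, PySem.Set.update_append, PySem.Set.update_cons,
      PySem.Set.update_cons, PySem.Set.update_nil,
      PySem.Set.update_cons]
    cases ys with
    | nil => rfl
    | cons z zs =>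
      rw [ih _ (by simp)]
      rw [PySem.Set.add_of_mem ((PySem.Set.mem_add (s.add x) y x).mpr
        (Or.inl ((PySem.Set.mem_add s x x).mpr (Or.inr rfl))))]

theorem update_flatMap_dup {α β : Type} [BEq α] [LawfulBEq α] (F : β → List α) (h : β → α)
    (hF : ∀ y, F y = [h y] ∨ F y = [h y, h y]) :
    ∀ (xs : List β) (s : PySem.Set α),
      PySem.Set.update s (xs.flatMap F) = PySem.Set.update s (xs.map h) := by
  intro xs
  induction xs with
  | nil => intro s; rfl
  | cons y ys ih =>
    intro s
    rw [List.flatMap_cons, List.map_cons, PySem.Set.update_append, PySem.Set.update_cons]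
    rcases hF y with hy | hy
    · rw [hy, PySem.Set.update_cons, PySem.Set.update_nil, ih]
    · rw [hy, PySem.Set.update_cons, PySem.Set.update_cons, PySem.Set.update_nil,
        PySem.Set.add_of_mem ((PySem.Set.mem_add s (h y) (h y)).mpr (Or.inr rfl)), ih]

theorem update_flatMap_if {α β : Type} [BEq β] [LawfulBEq β] [BEq α] [LawfulBEq α] (k : β) (c : α) :
    ∀ (xs : List β) (s : PySem.Set α),
      PySem.Set.update s (xs.flatMap (fun y => if y == k then [c] else [])) =
        if k ∈ xs then PySem.Set.add s c else s := by
  intro xs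
  induction xs with
  | nil => intro s; simp [PySem.Set.update_nil]
  | cons y ys ih =>
    intro s
    rw [List.flatMap_cons, PySem.Set.update_append]
    by_cases hy : y = k
    · subst hy
      rw [if_pos (show (y == y) = true by simp), PySem.Set.update_cons,
        PySem.Set.update_nil, ih, if_pos (show y ∈ y :: ys by simp)]
      by_cases hk : y ∈ ys
      · rw [if_pos hk]
        exact PySem.Set.add_of_mem ((PySem.Set.mem_add s c c).mpr (Or.inr rfl))
      · rw [if_neg hk]
    · rw [if_neg (by simpa using hy), PySem.Set.update_nil, ih]
      have hiff : (k ∈ y :: ys) ↔ (k ∈ ys) := by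
        constructor
        · intro h
          rcases List.mem_cons.mp h with h | h
          · exact absurd h.symm hy
          · exact h
        · exact fun h => List.mem_cons.mpr (Or.inr h)
      exact (if_congr hiff rfl rfl).symm

-- membership shapes of the two update sequences
theorem mem_opsAL (sym : Bool) :
    ∀ (l : List Pt) (p : Pt × Pt), p ∈ opsAL sym l → p.1 ∈ l ∧ ∃ y ∈ l, p.2 = gfun sym p.1 y := by
  intro l
  induction l with
  | nil => intro p hp; simp [opsAL] at hp
  | cons x xs ih =>
    intro p hp
    rw [opsAL, List.mem_append] at hp
    rcases hp with hp | hp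
    · rw [List.mem_flatMap] at hp
      obtain ⟨y, hy, hpy⟩ := hp
      simp only [List.mem_cons, List.not_mem_nil, or_false] at hpy
      rcases hpy with rfl | rfl
      · exact ⟨by simp, y, by simp [hy]⟩
      · exact ⟨by simp [hy], x, by simp⟩
    · obtain ⟨h1, y, hy, h2⟩ := ih p hp
      exact ⟨by simp [h1], y, by simp [hy], h2⟩

theorem mem_opsBL (sym : Bool) :
    ∀ (l : List Pt) (p : Pt × Pt), p ∈ opsBL sym l → p.1 ∈ l := by
  intro l
  induction l with
  | nil => intro p hp; simp [opsBL] at hp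
  | cons x xs ih =>
    intro p hp
    rw [opsBL, List.mem_append, List.mem_append] at hp
    rcases hp with hp | hp | hp
    · obtain ⟨y, _, rfl⟩ := List.mem_map.mp hp
      simp
    · obtain ⟨y, hy, rfl⟩ := List.mem_map.mp hp
      simp [hy]
    · simp [ih p hp]

-- the key sequences of both programs dedup to the beacon list itself
theorem keysA_update (sym : Bool) (l : List Pt) (hl : 2 ≤ l.length) (s : PySem.Set Pt) :
    PySem.Set.update s ((opsAL sym l).map (fun p => p.1)) = PySem.Set.update s l := by
  match l, hl with
  | x :: y :: xs, _ =>
    rw [opsAL, List.map_append, PySem.Set.update_append]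
    have hfst : (List.flatMap (fun y => [(x, gfun sym x y), (y, gfun sym y x)]) (y :: xs)).map
        (fun p => p.1) = (y :: xs).flatMap (fun y => [x, y]) := by
      rw [List.map_flatMap]
      rfl
    have habs : ∀ z ∈ (opsAL sym (y :: xs)).map (fun p => p.1),
        z ∈ PySem.Set.update (PySem.Set.add s x) (y :: xs) := by
      intro z hz
      rw [List.mem_map] at hz
      obtain ⟨p, hp, rfl⟩ := hz
      have := (mem_opsAL sym (y :: xs) p hp).1
      rw [PySem.Set.mem_update]
      exact Or.inr this
    rw [hfst, update_flatMap_pair x (y :: xs) s (by simp), update_absorb _ _ habs,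
      show PySem.Set.update s (x :: y :: xs) = PySem.Set.update (s.add x) (y :: xs) from
        PySem.Set.update_cons s x _]

theorem keysB_update (sym : Bool) (l : List Pt) (hl : 2 ≤ l.length) (s : PySem.Set Pt) :
    PySem.Set.update s ((opsBL sym l).map (fun p => p.1)) = PySem.Set.update s l := by
  match l, hl with
  | x :: y :: xs, _ =>
    rw [opsBL, List.map_append, List.map_append, PySem.Set.update_append,
      PySem.Set.update_append, List.map_map, List.map_map]
    have hc1 : ((fun p : Pt × Pt => p.1) ∘ (fun z => ((x : Pt), gfun sym x z))) = (fun _ => x) := rfl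
    have hc2 : ((fun p : Pt × Pt => p.1) ∘ (fun z : Pt => (z, gfun sym z x))) = (fun z => z) := rfl
    rw [hc1, hc2, update_map_const x (y :: xs) s (by simp),
      show List.map (fun z : Pt => z) (y :: xs) = y :: xs by simp]
    have habs : ∀ z ∈ (opsBL sym (y :: xs)).map (fun p => p.1),
        z ∈ PySem.Set.update (PySem.Set.add s x) (y :: xs) := by
      intro z hz
      rw [List.mem_map] at hz
      obtain ⟨p, hp, rfl⟩ := hz
      have := mem_opsBL sym (y :: xs) p hp
      rw [PySem.Set.mem_update]
      exact Or.inr this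
    rw [update_absorb _ _ habs,
      show PySem.Set.update s (x :: y :: xs) = PySem.Set.update (s.add x) (y :: xs) from
        PySem.Set.update_cons s x _]

-- per key, the value sequences of both programs dedup to the differences to all other beacons
theorem valsA_update (sym : Bool) (k : Pt) :
    ∀ (l : List Pt) (s : PySem.Set Pt),
      PySem.Set.update s (valsFor k (opsAL sym l)) =
        if k ∈ l then PySem.Set.update s ((l.erase k).map (fun y => gfun sym k y)) else s := by
  intro l
  induction l with
  | nil => intro s; simp [opsAL, valsFor, PySem.Set.update_nil]
  | cons x xs ih =>
    intro s
    rw [opsAL, valsFor_append, PySem.Set.update_append, valsFor_flatMap]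
    by_cases hx : x = k
    · subst hx
      have hvb : ∀ y : Pt, valsFor x [(x, gfun sym x y), (y, gfun sym y x)] =
          [gfun sym x y] ++ (if y = x then [gfun sym y x] else []) := by
        intro y
        by_cases hy : y = x
        · subst hy; simp [valsFor]
        · simp [valsFor, hy]
      have hdup : PySem.Set.update s
            (xs.flatMap fun y => valsFor x [(x, gfun sym x y), (y, gfun sym y x)]) =
          PySem.Set.update s (xs.map (fun y => gfun sym x y)) := by
        apply update_flatMap_dup _ (fun y => gfun sym x y)
        intro y
        rw [hvb y]
        by_cases hy : y = x
        · subst hy; simp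
        · simp [hy]
      have habs : ∀ v ∈ valsFor x (opsAL sym xs),
          v ∈ PySem.Set.update s (xs.map (fun y => gfun sym x y)) := by
        intro v hv
        rw [PySem.Set.mem_update]
        right
        obtain ⟨p, hp, rfl⟩ := List.mem_map.mp hv
        rw [List.mem_filter] at hp
        obtain ⟨hpm, hpk⟩ := hp
        have hk1 : p.1 = x := by simpa using hpk
        obtain ⟨_, y, hy, h2⟩ := mem_opsAL sym xs p hpm
        rw [List.mem_map]
        exact ⟨y, hy, by rw [h2, hk1]⟩
      rw [hdup, update_absorb _ _ habs, if_pos (by simp), List.erase_cons_head]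
    · have hvb : (fun y => valsFor k [(x, gfun sym x y), (y, gfun sym y x)]) =
          (fun y : Pt => if y == k then [gfun sym k x] else []) := by
        funext y
        by_cases hy : y = k
        · subst hy; simp [valsFor, hx]
        · simp [valsFor, hx, hy]
      rw [hvb, update_flatMap_if k (gfun sym k x) xs s]
      by_cases hk : k ∈ xs
      · rw [if_pos hk, ih, if_pos hk, if_pos (by simp [hk]),
          List.erase_cons_tail (by simpa using hx), List.map_cons, PySem.Set.update_cons]
      · rw [if_neg hk, ih, if_neg hk,
          if_neg (show k ∉ x :: xs by
            simp only [List.mem_cons]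
            exact fun h => h.elim (fun h1 => hx h1.symm) hk)]

theorem valsB_update (sym : Bool) (k : Pt) :
    ∀ (l : List Pt) (s : PySem.Set Pt),
      PySem.Set.update s (valsFor k (opsBL sym l)) =
        if k ∈ l then PySem.Set.update s ((l.erase k).map (fun y => gfun sym k y)) else s := by
  intro l
  induction l with
  | nil => intro s; simp [opsBL, valsFor, PySem.Set.update_nil]
  | cons x xs ih =>
    intro s
    rw [opsBL, valsFor_append, valsFor_append, PySem.Set.update_append,
      PySem.Set.update_append, valsFor_block k x (fun y => gfun sym x y) xs]
    by_cases hx : x = k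
    · subst hx
      rw [if_pos rfl, update_selfblock x (fun y => gfun sym y x) xs, ih]
      have hS1 : ∀ t : PySem.Set Pt,
          (if x ∈ xs then PySem.Set.add (PySem.Set.update s (xs.map fun y => gfun sym x y)) (gfun sym x x)
            else PySem.Set.update s (xs.map fun y => gfun sym x y)) =
            PySem.Set.update s (xs.map fun y => gfun sym x y) := by
        intro _
        by_cases hk : x ∈ xs
        · rw [if_pos hk, PySem.Set.add_of_mem]
          rw [PySem.Set.mem_update]
          exact Or.inr (List.mem_map.mpr ⟨x, hk, rfl⟩)
        · rw [if_neg hk]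
      rw [hS1 s]
      by_cases hk : x ∈ xs
      · rw [if_pos hk]
        have habs : ∀ v ∈ (xs.erase x).map (fun y => gfun sym x y),
            v ∈ PySem.Set.update s (xs.map fun y => gfun sym x y) := by
          intro v hv
          obtain ⟨y, hy, rfl⟩ := List.mem_map.mp hv
          rw [PySem.Set.mem_update]
          exact Or.inr (List.mem_map.mpr ⟨y, List.mem_of_mem_erase hy, rfl⟩)
        rw [update_absorb _ _ habs, if_pos (by simp), List.erase_cons_head]
      · rw [if_neg hk, if_pos (by simp), List.erase_cons_head]
    · rw [if_neg hx, PySem.Set.update_nil,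
        update_selfblock k (fun y => gfun sym y x) xs, ih]
      have hiff : (k ∈ x :: xs) ↔ (k ∈ xs) := by
        constructor
        · intro h
          rcases List.mem_cons.mp h with h | h
          · exact absurd h.symm hx
          · exact h
        · exact fun h => List.mem_cons.mpr (Or.inr h)
      by_cases hk : k ∈ xs
      · rw [if_pos hk, if_pos hk, if_pos (hiff.mpr hk),
          List.erase_cons_tail (by simpa using hx), List.map_cons, PySem.Set.update_cons]
      · rw [if_neg hk, if_neg hk, if_neg (fun h => hk (hiff.mp h))]

-- valsU over the items of a nodup-keyed table picks exactly that key's entry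
theorem valsU_items (k : Pt) (V : Pt → List Pt) :
    ∀ (ks : List Pt), ks.Nodup →
      valsU k (ks.map (fun k' => (k', V k'))) = if k ∈ ks then V k else [] := by
  intro ks
  induction ks with
  | nil => intro _; simp [valsU]
  | cons a ks ih =>
    intro hnd
    have hrec := ih (List.Nodup.of_cons hnd)
    rw [List.map_cons, show valsU k ((a, V a) :: List.map (fun k' => (k', V k')) ks) =
      (if a = k then V a else []) ++ valsU k (List.map (fun k' => (k', V k')) ks) from rfl, hrec]
    by_cases ha : a = k
    · subst ha
      have hnk : a ∉ ks := (List.nodup_cons.mp hnd).1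
      rw [if_pos rfl, if_neg hnk, if_pos (by simp), List.append_nil]
    · rw [if_neg ha]
      by_cases hk : k ∈ ks
      · rw [if_pos hk, if_pos (by simp [hk]), List.nil_append]
      · rw [if_neg hk, if_neg (by
          simp only [List.mem_cons]
          exact fun h => h.elim (fun h1 => ha h1.symm) hk), List.nil_append]

theorem valsFor_eq_nil_of_not_mem (k : Pt) (ops : List (Pt × Pt))
    (h : k ∉ ops.map (fun p => p.1)) : valsFor k ops = [] := by
  unfold valsFor
  rw [List.filter_eq_nil_iff.mpr, List.map_nil]
  intro p hp hbe
  exact h (List.mem_map.mpr ⟨p, hp, by simpa using hbe⟩)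

-- bridges from Source B's helpers to gfun
theorem difff_eq (sym : Bool) (x : Pt) : difff sym x = fun b => gfun sym x b := by
  funext b
  cases sym <;> rfl

theorem backf_eq (sym : Bool) (x : Pt) : backf sym x = fun b => gfun sym b x := by
  funext b
  cases sym with
  | false => rfl
  | true =>
    show difff true x b = gfun true b x
    rw [difff_eq]
    show gfun true x b = gfun true b x
    simp only [gfun, if_true]
    exact tsa_comm x b

theorem keys_foldU (ops : List (Pt × List Pt)) (d : PySem.Dict Pt (PySem.Set Pt)) :
    (ops.foldl applyUpd d).keys = PySem.Set.update d.keys (ops.map (fun p => p.1)) := by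
  exact PySem.Dict.keys_foldl_modify_key ops (fun p => p.1) PySem.Set.empty
    (fun _ p => fun s => PySem.Set.update s p.2) d

-- replaying the items of a table built from ops merges, per key, exactly that key's values
theorem update_valsU_dict (k : Pt) (ops : List (Pt × Pt)) (S : PySem.Set Pt) :
    PySem.Set.update S (valsU k ((ops.foldl applyOp PySem.Dict.empty).items)) =
      PySem.Set.update S (valsFor k ops) := by
  rw [items_fold, valsU_items k _ _ (PySem.Set.nodup_ofList _)]
  by_cases hk : k ∈ PySem.Set.ofList (ops.map (fun p => p.1))
  · rw [if_pos hk, update_ofList_right]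
  · rw [if_neg hk,
      valsFor_eq_nil_of_not_mem k ops (fun h => hk ((PySem.Set.mem_ofList _ _).mpr h)),
      PySem.Set.update_nil]

-- B's port computes the fold of opsBL
theorem portB_eq (beacons : List Pt) (sym : Bool) :
    calculate_differences_alt beacons sym =
      ((opsBL sym beacons).foldl applyOp PySem.Dict.empty).items.map
        (fun p => (p.1.1, p.1.2.1, p.1.2.2, p.2)) := by
  induction beacons with
  | nil => rfl
  | cons x rest ih =>
    by_cases hr : rest = []
    · subst hr; rfl
    · rw [calculate_differences_alt, if_neg hr, ih]
      show ((((opsBL sym rest).foldl applyOp PySem.Dict.empty).items.map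
            (fun p => (p.1.1, p.1.2.1, p.1.2.2, p.2))).foldl
            (fun o kv => o.modify (kv.1, kv.2.1, kv.2.2.1) PySem.Set.empty
              (fun s => PySem.Set.update s kv.2.2.2))
            (rest.foldl (fun o b => o.modify b PySem.Set.empty
                (fun s => PySem.Set.add s (backf sym x b)))
              (PySem.Dict.empty.insert x
                (PySem.Set.ofList (rest.map (difff sym x)))))).items.map
            (fun p => (p.1.1, p.1.2.1, p.1.2.2, p.2)) = _
      -- stage 2 (back edges) is a fold of elementary ops
      have hback : ∀ O0 : PySem.Dict Pt (PySem.Set Pt),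
          rest.foldl (fun o b => o.modify b PySem.Set.empty
            (fun s => PySem.Set.add s (backf sym x b))) O0 =
          (rest.map (fun b => (b, gfun sym b x))).foldl applyOp O0 := by
        intro O0
        simp only [backf_eq sym x]
        rw [List.foldl_map]
        rfl
      -- stage 3 (merge) is a fold of applyUpd over the sub-table's items
      have hmerge : ∀ O1 : PySem.Dict Pt (PySem.Set Pt),
          (((opsBL sym rest).foldl applyOp PySem.Dict.empty).items.map
            (fun p => (p.1.1, p.1.2.1, p.1.2.2, p.2))).foldl
            (fun o kv => o.modify (kv.1, kv.2.1, kv.2.2.1) PySem.Set.empty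
              (fun s => PySem.Set.update s kv.2.2.2)) O1 =
          ((opsBL sym rest).foldl applyOp PySem.Dict.empty).items.foldl applyUpd O1 := by
        intro O1
        rw [List.foldl_map]
        rfl
      rw [hback, hmerge, difff_eq sym x]
      -- items of both dictionaries agree
      congr 1
      have hlen2 : 2 ≤ (x :: rest).length := by
        cases rest with
        | nil => exact absurd rfl hr
        | cons a t => simp only [List.length_cons]; omega
      have hnilx : PySem.Set.update ([] : PySem.Set Pt) (x :: rest) =
          PySem.Set.update [x] rest := by
        rw [PySem.Set.update_cons, PySem.Set.add_of_not_mem (by simp)]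
        rfl
      -- keys of the LHS dictionary
      have hK1 : ((rest.map (fun b => (b, gfun sym b x))).foldl applyOp
            (PySem.Dict.empty.insert x
              (PySem.Set.ofList (rest.map (fun b => gfun sym x b))))).keys =
          PySem.Set.update [x] rest := by
        rw [keys_fold, List.map_map,
          show ((fun p : Pt × Pt => p.1) ∘ (fun b : Pt => (b, gfun sym b x))) =
            (fun b : Pt => b) from rfl,
          show List.map (fun b : Pt => b) rest = rest by simp]
        congr 1
      have hKL : (((opsBL sym rest).foldl applyOp PySem.Dict.empty).items.foldl applyUpd
            ((rest.map (fun b => (b, gfun sym b x))).foldl applyOp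
              (PySem.Dict.empty.insert x
                (PySem.Set.ofList (rest.map (fun b => gfun sym x b)))))).keys =
          PySem.Set.update ([] : PySem.Set Pt) (x :: rest) := by
        rw [keys_foldU, hK1, hnilx]
        apply update_absorb
        intro z hz
        rw [List.mem_map] at hz
        obtain ⟨p, hp, rfl⟩ := hz
        have hone : p.1 ∈ ((opsBL sym rest).foldl applyOp PySem.Dict.empty).keys := by
          simp only [PySem.Dict.keys]
          exact List.mem_map.mpr ⟨p, hp, rfl⟩
        rw [keys_fold, PySem.Dict.keys_empty, PySem.Set.update_nil_left,
          PySem.Set.mem_ofList, List.mem_map] at hone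
        obtain ⟨q, hq, hq1⟩ := hone
        rw [PySem.Set.mem_update]
        exact Or.inr (hq1 ▸ mem_opsBL sym rest q hq)
      -- keys of the RHS dictionary
      have hKR : ((opsBL sym (x :: rest)).foldl applyOp PySem.Dict.empty).keys =
          PySem.Set.update ([] : PySem.Set Pt) (x :: rest) := by
        rw [keys_fold, PySem.Dict.keys_empty, keysB_update sym (x :: rest) hlen2 []]
      -- per-key contents agree
      have hgetD : ∀ k : Pt,
          (((opsBL sym rest).foldl applyOp PySem.Dict.empty).items.foldl applyUpd
            ((rest.map (fun b => (b, gfun sym b x))).foldl applyOp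
              (PySem.Dict.empty.insert x
                (PySem.Set.ofList (rest.map (fun b => gfun sym x b)))))).getD k PySem.Set.empty =
          ((opsBL sym (x :: rest)).foldl applyOp PySem.Dict.empty).getD k PySem.Set.empty := by
        intro k
        rw [getD_foldU, getD_fold, PySem.Dict.getD_insert, PySem.Dict.getD_empty,
          update_valsU_dict k (opsBL sym rest),
          getD_fold k (opsBL sym (x :: rest)) PySem.Dict.empty, PySem.Dict.getD_empty,
          opsBL, valsFor_append, valsFor_append, PySem.Set.update_append,
          PySem.Set.update_append,
          valsFor_block k x (fun y => gfun sym x y) rest]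
        congr 2
        by_cases hkx : k = x
        · rw [if_pos hkx, if_pos hkx.symm,
            show (PySem.Set.empty : PySem.Set Pt) = [] from rfl, PySem.Set.update_nil_left]
        · rw [if_neg hkx, if_neg (fun h => hkx h.symm), PySem.Set.update_nil]
      -- conclude via the items-as-map-of-keys representation
      have hndL : (((opsBL sym rest).foldl applyOp PySem.Dict.empty).items.foldl applyUpd
            ((rest.map (fun b => (b, gfun sym b x))).foldl applyOp
              (PySem.Dict.empty.insert x
                (PySem.Set.ofList (rest.map (fun b => gfun sym x b)))))).keys.Nodup := by
        rw [hKL, PySem.Set.update_nil_left]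
        exact PySem.Set.nodup_ofList _
      have hndR : ((opsBL sym (x :: rest)).foldl applyOp PySem.Dict.empty).keys.Nodup := by
        rw [hKR, PySem.Set.update_nil_left]
        exact PySem.Set.nodup_ofList _
      rw [PySem.Dict.items_eq_map_keys _ hndL PySem.Set.empty,
        PySem.Dict.items_eq_map_keys _ hndR PySem.Set.empty, hKL, hKR]
      apply List.map_congr_left
      intro k _
      exact congrArg (Prod.mk k) (hgetD k)
-- canonical items of both folds agree; the final theorem
theorem portsAgree (beacons : List Pt) (sym : Bool) :
    ((opsAL sym beacons).foldl applyOp PySem.Dict.empty).items =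
      ((opsBL sym beacons).foldl applyOp PySem.Dict.empty).items := by
  rw [items_fold, items_fold]
  match beacons with
  | [] => rfl
  | [x] => rfl
  | x :: y :: xs =>
    have hkeys : PySem.Set.ofList ((opsAL sym (x :: y :: xs)).map (fun p => p.1)) =
        PySem.Set.ofList ((opsBL sym (x :: y :: xs)).map (fun p => p.1)) := by
      rw [← PySem.Set.update_nil_left ((opsAL sym (x :: y :: xs)).map (fun p => p.1)),
        ← PySem.Set.update_nil_left ((opsBL sym (x :: y :: xs)).map (fun p => p.1)),
        keysA_update sym _ (by simp) [], keysB_update sym _ (by simp) []]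
    rw [hkeys]
    apply List.map_congr_left
    intro k _
    have hA := valsA_update sym k (x :: y :: xs) []
    have hB := valsB_update sym k (x :: y :: xs) []
    rw [← PySem.Set.update_nil_left (valsFor k (opsAL sym (x :: y :: xs))),
      ← PySem.Set.update_nil_left (valsFor k (opsBL sym (x :: y :: xs))),
      hA, hB]

-- ===== VERDICT (by name: the statement is the Claim_ definition above) =====
theorem calculate_differences_spec : Claim_equal_calculate_differences := by
  intro beacons sym _
  unfold Spec_calculate_differences
  rw [portA_eq, portB_eq, portsAgree]
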